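-- pv_equiv track=rewrite | github.com/elektro-NIK/P3DA | software/main.py | strob
-- ===== SOURCE A (Python) =====
-- def strob(colors, interval):
--     res = []
--     for i in colors:
--         flash = [i, '#000000', '#000000', '#000000', i]
--         time = 20 * 5
--         while time < interval:
--             flash.append('#000000')
--             time += 20
--         res += flash
--     return 20, res
-- ===== SOURCE B (Python) =====
-- def strob(colors, interval):
--     n = max(0, -((100 - interval) // 20))
--     tail = ['#000000'] * n
--     res = [c for i in colors for c in ([i, '#000000', '#000000', '#000000', i] + tail)]
--     return 20, res
-- ===== Notes on version B (the rewrite author's own statement) =====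
-- stated objective: simpler
-- what changed: The inner while-loop counting up in steps of 20 is replaced by a closed-form ceiling count computed once, and the output is built by list replication and a flat comprehension instead of repeated appends.
import Mathlib
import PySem

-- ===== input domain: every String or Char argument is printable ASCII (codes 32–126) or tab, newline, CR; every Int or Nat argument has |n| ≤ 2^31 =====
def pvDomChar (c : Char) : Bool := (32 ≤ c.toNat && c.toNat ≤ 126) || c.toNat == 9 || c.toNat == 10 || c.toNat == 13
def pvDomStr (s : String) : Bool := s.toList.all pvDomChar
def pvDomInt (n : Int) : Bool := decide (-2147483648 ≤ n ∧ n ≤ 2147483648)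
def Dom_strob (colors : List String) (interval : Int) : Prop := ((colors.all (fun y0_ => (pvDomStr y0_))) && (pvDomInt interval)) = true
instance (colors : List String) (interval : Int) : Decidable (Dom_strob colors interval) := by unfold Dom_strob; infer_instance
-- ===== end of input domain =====

-- B replaces the inner while-loop by a closed-form count with list replication (objective: simpler).

-- ===== PORT A =====
-- the 'while time < interval: flash.append('#000000'); time += 20' loop, step for step
def strobLoop (interval : Int) (flash : List String) (time : Int) : List String :=
  if time < interval then strobLoop interval (flash ++ ["#000000"]) (time + 20)
  else flash
termination_by (interval - time).toNat
decreasing_by omega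

def strob (colors : List String) (interval : Int) : Int × List String :=
  (20, colors.foldl (fun res i => res ++ strobLoop interval [i, "#000000", "#000000", "#000000", i] 100) [])

-- ===== PORT B =====
def strob_alt (colors : List String) (interval : Int) : Int × List String :=
  let n : Int := max 0 (-(PySem.Int.floordiv (100 - interval) 20))
  let tail : List String := List.replicate n.toNat "#000000"
  (20, colors.flatMap (fun i => [i, "#000000", "#000000", "#000000", i] ++ tail))

-- ===== PRECONDITION & SPEC =====
def Spec_strob (colors : List String) (interval : Int) (out : Int × List String) : Prop := out = strob_alt colors interval
instance (colors : List String) (interval : Int) (out : Int × List String) : Decidable (Spec_strob colors interval out) := by unfold Spec_strob; infer_instance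

-- ===== CLAIM (what is proved, stated in full; the proofs are below) =====
def Claim_equal_strob : Prop := ∀ (colors : List String) (interval : Int), Dom_strob colors interval → Spec_strob colors interval (strob colors interval)

-- ===== LEMMAS AND PROOFS =====

lemma strobLoop_eq (interval : Int) (flash : List String) (time : Int) :
    strobLoop interval flash time =
      flash ++ List.replicate (max 0 (-(PySem.Int.floordiv (time - interval) 20))).toNat "#000000" := by
  fun_induction strobLoop interval flash time with
  | case1 flash time h ih =>
    rw [ih]
    have h1 : PySem.Int.floordiv (time - interval) 20 = (time - interval) / 20 :=
      PySem.Int.floordiv_eq_ediv_of_pos (by omega)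
    have h2 : PySem.Int.floordiv (time + 20 - interval) 20 = (time + 20 - interval) / 20 :=
      PySem.Int.floordiv_eq_ediv_of_pos (by omega)
    have hc : (max 0 (-(PySem.Int.floordiv (time - interval) 20))).toNat
        = (max 0 (-(PySem.Int.floordiv (time + 20 - interval) 20))).toNat + 1 := by
      rw [h1, h2]; omega
    rw [hc, List.replicate_succ]
    simp
  | case2 flash time h =>
    have h1 : PySem.Int.floordiv (time - interval) 20 = (time - interval) / 20 :=
      PySem.Int.floordiv_eq_ediv_of_pos (by omega)
    have hc : (max 0 (-(PySem.Int.floordiv (time - interval) 20))).toNat = 0 := by rw [h1]; omega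
    rw [hc]; simp

-- ===== VERDICT (by name: the statement is the Claim_ definition above) =====
theorem strob_spec : Claim_equal_strob := by
  intro colors interval _
  unfold Spec_strob strob strob_alt
  refine congrArg (Prod.mk 20) ?_
  rw [PySem.List.foldl_append_eq_flatMap]
  simp only [List.nil_append]
  refine congrArg (colors.flatMap) ?_
  funext i
  rw [strobLoop_eq]
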